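-- pv_equiv track=rewrite | github.com/OnYyon/EGE | PRO100EGE/task15/bits/task1.py | check
-- ===== SOURCE A (Python) =====
-- def check(a):
--     for x in range(100500):
--         f1 = x % a == 0
--         f2 = x % 21 == 0
--         f3 = x % 35 == 0
--         if (f1 <= ((not f2) or f3)) != 1:
--             return 0
--     return 1
-- ===== SOURCE B (Python) =====
-- def check(a):
--     # The implication f1 <= (not f2 or f3) can only fail when x is a multiple
--     # of 21, so only multiples of 21 need checking: fail iff x % a == 0 and
--     # x % 35 != 0.  x = 0 is still visited first, so a == 0 still raises
--     # ZeroDivisionError exactly as in the original.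
--     for x in range(0, 100500, 21):
--         if x % a == 0 and x % 35 != 0:
--             return 0
--     return 1
-- ===== Notes on version B (the rewrite author's own statement) =====
-- stated objective: faster
-- what changed: B iterates only over the multiples of 21 (the only x where the implication can fail) and tests the direct predicate x%a==0 and x%35!=0, instead of scanning all 100500 x with the f1<=(not f2 or f3) boolean encoding.
import Mathlib
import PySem

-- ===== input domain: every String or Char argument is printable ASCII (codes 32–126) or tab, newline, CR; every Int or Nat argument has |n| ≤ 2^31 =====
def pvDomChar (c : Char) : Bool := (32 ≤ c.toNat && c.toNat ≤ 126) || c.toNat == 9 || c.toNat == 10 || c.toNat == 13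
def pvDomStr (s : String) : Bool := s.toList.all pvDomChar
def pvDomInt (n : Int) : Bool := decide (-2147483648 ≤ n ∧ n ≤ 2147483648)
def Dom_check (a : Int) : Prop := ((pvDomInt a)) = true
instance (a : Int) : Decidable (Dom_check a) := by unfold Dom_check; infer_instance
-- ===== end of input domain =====

-- B checks only the multiples of 21 (the only x where the implication can fail)
-- with the direct predicate x%a==0 ∧ x%35≠0, instead of scanning every x < 100500.

-- ===== PORT A =====
def checkLoopA (a : Int) : List Int → Int
  | [] => 1
  | x :: rest =>
    let f1 : Bool := PySem.Int.mod x a == 0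
    let f2 : Bool := PySem.Int.mod x 21 == 0
    let f3 : Bool := PySem.Int.mod x 35 == 0
    -- Python's `f1 <= ((not f2) or f3)` on bools is material implication: !f1 || …
    if ((!f1 || (!f2 || f3)) != true) then 0
    else checkLoopA a rest

def check (a : Int) : Int := checkLoopA a (PySem.List.pyRange 0 100500 1)

-- ===== PORT B =====
def checkLoopB (a : Int) : List Int → Int
  | [] => 1
  | x :: rest =>
    if PySem.Int.mod x a == 0 && !(PySem.Int.mod x 35 == 0) then 0
    else checkLoopB a rest

def check_alt (a : Int) : Int := checkLoopB a (PySem.List.pyRange 0 100500 21)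

-- ===== PRECONDITION & SPEC =====
-- a = 0 is excluded: both A and B raise ZeroDivisionError at x = 0 (the first x visited).
def Pre_check (a : Int) : Prop := a ≠ 0
instance (a : Int) : Decidable (Pre_check a) := by unfold Pre_check; infer_instance
def pvWitness_check : Int := 3

def Spec_check (a : Int) (out : Int) : Prop := out = check_alt a
instance (a : Int) (out : Int) : Decidable (Spec_check a out) := by unfold Spec_check; infer_instance

-- ===== CLAIM (what is proved, stated in full; the proofs are below) =====
def Claim_equal_check : Prop := ∀ (a : Int), Dom_check a → Pre_check a → Spec_check a (check a)

-- ===== LEMMAS AND PROOFS =====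

-- early-return-or-continue loop body as a single disjunction
theorem if_or_split (c r : Bool) :
    (if c = true then (0:Int) else if r = true then 0 else 1) =
      if (c || r) = true then 0 else 1 := by
  cases c <;> cases r <;> simp

-- Python's `(f1 <= ((not f2) or f3)) != 1` is `f1 && f2 && !f3`
theorem bool_impl_neg (f1 f2 f3 : Bool) :
    ((!f1 || (!f2 || f3)) != true) = (f1 && (f2 && !f3)) := by
  cases f1 <;> cases f2 <;> cases f3 <;> rfl

-- A's loop returns 0 iff some x in the list satisfies f1 ∧ f2 ∧ ¬f3.
theorem loopA_eq_any (a : Int) (l : List Int) :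
    checkLoopA a l =
      if l.any (fun x => PySem.Int.mod x a == 0 &&
          (PySem.Int.mod x 21 == 0 && !(PySem.Int.mod x 35 == 0))) then 0 else 1 := by
  induction l with
  | nil => simp [checkLoopA]
  | cons x rest ih =>
    simp only [checkLoopA, List.any_cons, ih]
    rw [bool_impl_neg, if_or_split]
    rfl


-- B's loop returns 0 iff some x in the list satisfies its predicate.
theorem loopB_eq_any (a : Int) (l : List Int) :
    checkLoopB a l =
      if l.any (fun x => PySem.Int.mod x a == 0 && !(PySem.Int.mod x 35 == 0)) then 0 else 1 := by
  induction l with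
  | nil => simp [checkLoopB]
  | cons x rest ih =>
    simp only [checkLoopB, List.any_cons, ih]
    rw [if_or_split]
    rfl

-- The two searches find a witness on exactly the same inputs.
theorem any_eq (a : Int) :
    (PySem.List.pyRange 0 100500 1).any (fun x => PySem.Int.mod x a == 0 &&
        (PySem.Int.mod x 21 == 0 && !(PySem.Int.mod x 35 == 0))) =
      (PySem.List.pyRange 0 100500 21).any
        (fun x => PySem.Int.mod x a == 0 && !(PySem.Int.mod x 35 == 0)) := by
  rw [Bool.eq_iff_iff]
  simp only [List.any_eq_true, Bool.and_eq_true, beq_iff_eq, Bool.not_eq_true',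
    beq_eq_false_iff_ne, ne_eq, PySem.List.mem_pyRange_one,
    PySem.List.mem_pyRange_iff_of_pos (by norm_num : (0:Int) < 21),
    PySem.Int.mod_eq_zero_iff_dvd, sub_zero]
  constructor
  · rintro ⟨x, ⟨h0, h1⟩, ha, h21, h35⟩
    exact ⟨x, ⟨h0, h1, h21⟩, ha, h35⟩
  · rintro ⟨x, ⟨h0, h1, h21⟩, ha, h35⟩
    exact ⟨x, ⟨h0, h1⟩, ha, h21, h35⟩

-- ===== VERDICT (by name: the statement is the Claim_ definition above) =====
theorem check_spec : Claim_equal_check := by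
  intro a _ _
  unfold Spec_check check check_alt
  rw [loopA_eq_any, loopB_eq_any, any_eq]
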